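-- pv_equiv track=rewrite | github.com/troywonhyuk/python | seasar.py | search
-- ===== SOURCE A (Python) =====
-- alpha=['A','B','C','D','E','F','G','H','I','J','K','L','M','N','O','P','Q','R','S','T','U','V','W','X','Y','Z',\
--        'a','b','c','d','e','f','g','h','i','j','k','l','m','n','o','p','q','r','s','t','u','v','w','x','y','z']
--
-- def search(x):
--     low=0
--     high=len(alpha)-1
--     while low<=high:
--         mid=(low+high)//2
--         if alpha[mid]<x:
--             low=mid+1
--         elif alpha[mid]>x:
--             high=mid-1
--         else:
--             return mid
--     return None
-- ===== SOURCE B (Python) =====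
-- alpha=['A','B','C','D','E','F','G','H','I','J','K','L','M','N','O','P','Q','R','S','T','U','V','W','X','Y','Z',\
--        'a','b','c','d','e','f','g','h','i','j','k','l','m','n','o','p','q','r','s','t','u','v','w','x','y','z']
--
-- def search(x):
--     for i, c in enumerate(alpha):
--         if c == x:
--             return i
--         if c > x:
--             return None
--     return None
-- ===== Notes on version B (the rewrite author's own statement) =====
-- stated objective: simpler
-- what changed: Replaces the binary search with its low/high/mid bookkeeping by a single front-to-back scan over the sorted alphabet that returns the index on a match and stops early once it has passed where x would sort.
import Mathlib
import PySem

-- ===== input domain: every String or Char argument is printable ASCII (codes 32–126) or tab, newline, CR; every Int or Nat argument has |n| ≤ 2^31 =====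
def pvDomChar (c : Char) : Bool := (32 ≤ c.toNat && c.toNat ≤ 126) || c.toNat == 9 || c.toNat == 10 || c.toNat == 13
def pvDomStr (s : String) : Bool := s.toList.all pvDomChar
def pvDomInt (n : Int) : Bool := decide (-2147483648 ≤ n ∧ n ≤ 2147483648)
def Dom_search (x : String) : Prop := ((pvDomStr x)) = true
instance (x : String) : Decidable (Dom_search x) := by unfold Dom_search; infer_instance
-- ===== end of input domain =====

-- B replaces the binary search (low/high/mid state) by a single early-terminating
-- front-to-back scan of the sorted alphabet; same result on every string input.

-- ===== PORT A =====
-- the module constant alpha (a list of one-character strings)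
def alpha : List String := ["A","B","C","D","E","F","G","H","I","J","K","L","M",
  "N","O","P","Q","R","S","T","U","V","W","X","Y","Z",
  "a","b","c","d","e","f","g","h","i","j","k","l","m",
  "n","o","p","q","r","s","t","u","v","w","x","y","z"]

-- the while loop of A; Python str comparison is code-point lexicographic ('<' on
-- toList, exact: PySem.Chars.strLt); fuel 52 over-counts the ≤ ⌈log₂ 52⌉ + 1
-- iterations, so the 0-fuel branch is unreachable; alpha[mid] via pyGet? (the
-- none branch is Python's IndexError, also unreachable since 0 ≤ low ≤ mid ≤ high ≤ 51)
def searchGo (xs : List Char) : Nat → Int → Int → Option Int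
  | 0, _, _ => none
  | fuel+1, low, high =>
    if low ≤ high then
      let mid := PySem.Int.floordiv (low + high) 2
      match PySem.List.pyGet? alpha mid with
      | none => none
      | some s =>
          if PySem.Chars.strLt s.toList xs then searchGo xs fuel (mid+1) high
          else if PySem.Chars.strLt xs s.toList then searchGo xs fuel low (mid-1)
          else some mid
    else none

def search (x : String) : Option Int :=
  searchGo x.toList 52 0 ((alpha.length : Int) - 1)

-- ===== PORT B =====
-- B's for loop over enumerate(alpha): return i on c == x (String equality = equality
-- of the char lists), return None on c > x, None after the loop
def scanGo (xs : List Char) : Int → List String → Option Int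
  | _, [] => none
  | i, s :: rest =>
    if s.toList == xs then some i
    else if PySem.Chars.strLt xs s.toList then none
    else scanGo xs (i+1) rest

def search_alt (x : String) : Option Int := scanGo x.toList 0 alpha

-- ===== PRECONDITION & SPEC =====
def Spec_search (x : String) (out : Option Int) : Prop := out = search_alt x
instance (x : String) (out : Option Int) : Decidable (Spec_search x out) := by unfold Spec_search; infer_instance

-- ===== CLAIM (what is proved, stated in full; the proofs are below) =====
def Claim_equal_search : Prop := ∀ (x : String), Dom_search x → Spec_search x (search x)

-- ===== LEMMAS AND PROOFS =====

-- Both programs see x only through comparisons with the one-character strings of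
-- alpha; `tkey` classifies x by those comparisons and `rep` picks a canonical
-- representative of each class, leaving finitely many cases to check.
def enc (xs : List Char) : Nat :=
  match xs with
  | [] => 0
  | d :: rest => 2 * d.toNat + (if rest.isEmpty then 0 else 1)

def tkey (xs : List Char) : Nat := min (enc xs) 250

def rep (t : Nat) : List Char :=
  if t % 2 = 0 then [Char.ofNat (t / 2)] else [Char.ofNat (t / 2), Char.ofNat 0]

theorem pyGet?_mem {α : Type} (l : List α) (i : Int) (a : α)
    (h : PySem.List.pyGet? l i = some a) : a ∈ l := by
  unfold PySem.List.pyGet? at h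
  cases hk : PySem.List.pyIdx? l.length i with
  | none => rw [hk] at h; simp at h
  | some k => rw [hk] at h; simp at h; exact List.mem_of_getElem? h

theorem char_lt_iff (c d : Char) : c < d ↔ c.toNat < d.toNat := by
  rw [Char.lt_def, UInt32.lt_iff_toNat_lt]; exact Iff.rfl

theorem char_eq_iff (c d : Char) : c = d ↔ c.toNat = d.toNat := by
  constructor
  · rintro rfl; rfl
  · intro h; exact Char.ext (UInt32.toNat_inj.mp h)

theorem lex_single_cons (c d : Char) (rest : List Char) :
    ([c] < d :: rest) ↔ (c < d ∨ (c = d ∧ rest ≠ [])) := by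
  constructor
  · intro h
    cases h with
    | cons h' => exact Or.inr ⟨rfl, by rintro rfl; cases h'⟩
    | rel h' => exact Or.inl h'
  · rintro (h | ⟨rfl, h⟩)
    · exact List.Lex.rel h
    · cases rest with
      | nil => exact absurd rfl h
      | cons e l => exact List.Lex.cons List.Lex.nil

theorem lex_cons_single (c d : Char) (rest : List Char) : (d :: rest < [c]) ↔ d < c := by
  constructor
  · intro h
    cases h with
    | cons h' => cases h'
    | rel h' => exact h'
  · exact fun h => List.Lex.rel h

theorem ofNat_toNat (n : Nat) (h : n ≤ 125) : (Char.ofNat n).toNat = n := by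
  rw [Char.toNat_ofNat]
  have : n.isValidChar := Or.inl (by omega)
  simp [this]

-- comparisons with a one-character string are determined by tkey
theorem strLt_left (c : Char) (hc1 : 1 ≤ c.toNat) (hc : c.toNat ≤ 124) (xs : List Char) :
    PySem.Chars.strLt [c] xs = decide (2 * c.toNat < tkey xs) := by
  unfold PySem.Chars.strLt
  cases xs with
  | nil => simp [tkey, enc]
  | cons d rest =>
    simp only [tkey, enc, lex_single_cons, char_lt_iff, char_eq_iff, decide_eq_decide]
    cases rest <;> simp <;> omega

theorem strLt_right (c : Char) (hc1 : 1 ≤ c.toNat) (hc : c.toNat ≤ 124) (xs : List Char) :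
    PySem.Chars.strLt xs [c] = decide (tkey xs < 2 * c.toNat) := by
  unfold PySem.Chars.strLt
  cases xs with
  | nil =>
    simp only [tkey, enc, decide_eq_decide]
    constructor
    · intro _; omega
    · intro _; exact List.Lex.nil
  | cons d rest =>
    simp only [tkey, enc, lex_cons_single, char_lt_iff, decide_eq_decide]
    cases rest <;> simp <;> omega

theorem beq_tkey (c : Char) (hc1 : 1 ≤ c.toNat) (hc : c.toNat ≤ 124) (xs : List Char) :
    ([c] == xs) = decide (tkey xs = 2 * c.toNat) := by
  rw [Bool.eq_iff_iff]
  simp only [beq_iff_eq, decide_eq_true_iff]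
  cases xs with
  | nil => simp [tkey, enc]; omega
  | cons d rest =>
    cases rest with
    | nil =>
      simp [tkey, enc, char_eq_iff]
      omega
    | cons e l => simp [tkey, enc]; omega

theorem tkey_le (xs : List Char) : tkey xs ≤ 250 := Nat.min_le_right _ _

theorem tkey_rep (t : Nat) (h : t ≤ 250) : tkey (rep t) = t := by
  unfold rep tkey enc
  by_cases hp : t % 2 = 0 <;> simp [hp, ofNat_toNat (t / 2) (by omega)] <;> omega

-- the property of every element of alpha the congruence lemmas need
theorem alpha_chars : ∀ s ∈ alpha, s.toList = [s.toList.headD 'A'] ∧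
    1 ≤ (s.toList.headD 'A').toNat ∧ (s.toList.headD 'A').toNat ≤ 124 := by decide

-- A's loop depends on xs only through tkey xs
theorem searchGo_rep (xs : List Char) :
    ∀ (f : Nat) (low high : Int), searchGo xs f low high = searchGo (rep (tkey xs)) f low high := by
  intro f
  induction f with
  | zero => intro low high; rfl
  | succ f ih =>
    intro low high
    unfold searchGo
    by_cases hlh : low ≤ high
    · simp only [if_pos hlh]
      cases hg : PySem.List.pyGet? alpha (PySem.Int.floordiv (low + high) 2) with
      | none => rfl
      | some s =>
        dsimp only
        obtain ⟨hs, hc1, hc⟩ := alpha_chars s (pyGet?_mem _ _ _ hg)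
        rw [hs, strLt_left _ hc1 hc xs, strLt_left _ hc1 hc (rep (tkey xs)),
          strLt_right _ hc1 hc xs, strLt_right _ hc1 hc (rep (tkey xs)),
          tkey_rep _ (tkey_le xs)]
        split <;> [exact ih _ _; skip]
        split <;> [exact ih _ _; rfl]
    · simp only [if_neg hlh]

-- B's loop depends on xs only through tkey xs
theorem scanGo_rep (xs : List Char) :
    ∀ (l : List String), (∀ s ∈ l, s ∈ alpha) → ∀ (i : Int),
      scanGo xs i l = scanGo (rep (tkey xs)) i l := by
  intro l
  induction l with
  | nil => intro _ _; rfl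
  | cons s rest ih =>
    intro hl i
    obtain ⟨hs, hc1, hc⟩ := alpha_chars s (hl s (List.mem_cons_self))
    unfold scanGo
    rw [hs, beq_tkey _ hc1 hc xs, beq_tkey _ hc1 hc (rep (tkey xs)),
      strLt_right _ hc1 hc xs, strLt_right _ hc1 hc (rep (tkey xs)),
      tkey_rep _ (tkey_le xs)]
    split
    · rfl
    · split
      · rfl
      · exact ih (fun s hs => hl s (List.mem_cons_of_mem _ hs)) _

-- the finitely many representative cases, checked by computation
set_option maxRecDepth 100000 in
theorem rep_cases : ∀ t < 251, searchGo (rep t) 52 0 ((alpha.length : Int) - 1) = scanGo (rep t) 0 alpha := by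
  decide

-- ===== VERDICT (by name: the statement is the Claim_ definition above) =====
theorem search_spec : Claim_equal_search := by
  intro x _
  unfold Spec_search search search_alt
  rw [searchGo_rep, scanGo_rep x.toList alpha (fun s hs => hs)]
  exact rep_cases (tkey x.toList) (by have := tkey_le x.toList; omega)
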